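-- pv_equiv track=rewrite | github.com/decaf12/advent-of-code | 2024/22/a.py | calc
-- ===== SOURCE A (Python) =====
-- from itertools import count
--
-- memo = {}
--
-- MOD = 16777216
--
-- def find_next(num: int):
--     if num in memo:
--         return memo[num]
--     start_num = num
--     res = num
--     res <<= 6
--     res ^= num
--     res %= MOD
--
--     num = res
--     res >>= 5
--     res ^= num
--     res %= MOD
--
--     num = res
--     res <<= 11
--     res ^= num
--     res %= MOD
--     memo[start_num] = res
--     return res
--
-- def calc(start: int, rounds: int):
--     lookup = {start: 0}
--     nums = [start]
--     num = start
--     for round in count(1):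
--         num = find_next(num)
--         if round == rounds:
--             return num
--         if num in lookup:
--             cycle_sp = lookup[num]
--             cycle_len = round - cycle_sp
--             break
--         lookup[num] = round
--         nums.append(num)
--     rounds_before_cycle = cycle_sp
--     remaining_rounds = rounds + 1 - rounds_before_cycle
--     remaining_rounds %= cycle_len
--     pos_in_round = (remaining_rounds - 1) % cycle_len
--     return nums[cycle_sp + pos_in_round]
-- ===== SOURCE B (Python) =====
-- MOD = 16777216
--
-- def find_next(num: int):
--     res = num
--     res <<= 6
--     res ^= num
--     res %= MOD
--
--     num = res
--     res >>= 5
--     res ^= num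
--     res %= MOD
--
--     num = res
--     res <<= 11
--     res ^= num
--     res %= MOD
--     return res
--
-- def calc(start: int, rounds: int):
--     # find_next always lands in [0, MOD) and is a bijection there, so the
--     # orbit of first = find_next(start) is a pure cycle: walk it, returning
--     # early once round `rounds` is reached; if the walk closes the cycle
--     # first, index the orbit by modulo (Python's % is non-negative, so zero
--     # and negative rounds wrap correctly).  No lookup table, no cycle-start
--     # bookkeeping.
--     first = find_next(start)
--     if rounds == 1:
--         return first
--     orbit = [first]
--     num = find_next(first)
--     r = 2
--     while num != first:
--         if r == rounds:
--             return num
--         orbit.append(num)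
--         num = find_next(num)
--         r += 1
--     return orbit[(rounds - 1) % len(orbit)]
-- ===== Notes on version B (the rewrite author's own statement) =====
-- stated objective: simpler
-- what changed: A's dict-based cycle detection (lookup table mapping value->round, cycle_sp/cycle_len bookkeeping and a two-step modular index) is replaced by a plain walk of the pure cycle of find_next(start) - find_next is a bijection of [0,16777216), so comparing against the first orbit element suffices - with the same early return and a single modulo index into the orbit.
import Mathlib
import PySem

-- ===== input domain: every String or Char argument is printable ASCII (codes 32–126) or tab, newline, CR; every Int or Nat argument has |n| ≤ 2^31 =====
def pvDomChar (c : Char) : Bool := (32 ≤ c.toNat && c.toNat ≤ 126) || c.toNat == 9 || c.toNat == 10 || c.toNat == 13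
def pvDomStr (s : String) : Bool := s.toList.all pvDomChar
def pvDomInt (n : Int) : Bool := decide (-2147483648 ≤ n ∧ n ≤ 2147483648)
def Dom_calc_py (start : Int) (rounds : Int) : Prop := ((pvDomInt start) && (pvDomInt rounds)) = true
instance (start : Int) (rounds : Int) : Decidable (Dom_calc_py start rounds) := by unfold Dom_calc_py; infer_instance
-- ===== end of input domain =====

-- B replaces A's dict-based cycle detection (lookup table + cycle_sp/cycle_len arithmetic) by a plain
-- walk of the pure cycle of find_next(start) — find_next is a bijection of [0, 16777216) — with a
-- single modulo index into the orbit; same asymptotic cost, no lookup table.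

-- ===== PORT A =====
-- module constant MOD (the Python module's `memo` is a pure cache and never changes any value;
-- the port computes find_next directly)
def pvMODC : Int := 16777216

def find_next (num : Int) : Int :=
  let res := num
  let res := res <<< (6:Nat)
  let res := PySem.Int.bxor res num
  let res := PySem.Int.mod res pvMODC
  let num := res
  let res := res >>> (5:Nat)
  let res := PySem.Int.bxor res num
  let res := PySem.Int.mod res pvMODC
  let num := res
  let res := res <<< (11:Nat)
  let res := PySem.Int.bxor res num
  let res := PySem.Int.mod res pvMODC
  res

-- range of find_next (termination helper for both loops, cited by decreasing_by)
lemma pv_mod_range (a b : Int) (hb : 0 < b) : 0 ≤ PySem.Int.mod a b ∧ PySem.Int.mod a b < b := by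
  rw [PySem.Int.mod_eq_emod_of_pos hb]
  exact ⟨Int.emod_nonneg _ (by omega), Int.emod_lt_of_pos _ hb⟩

lemma find_next_range (n : Int) : 0 ≤ find_next n ∧ find_next n < pvMODC :=
  pv_mod_range _ _ (by norm_num [pvMODC])

-- a Nodup list of keys, each either `s` or in [0, pvMODC), has at most 16777217 entries
-- (termination helper for A's loop)
lemma pv_keys_len (s : Int) (l : List Int) (hnd : l.Nodup)
    (hsub : ∀ k ∈ l, k = s ∨ (0 ≤ k ∧ k < pvMODC)) : l.length ≤ 16777217 := by
  have hsubset : l.toFinset ⊆ insert s (Finset.Icc (0:Int) (pvMODC - 1)) := by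
    intro x hx
    rcases hsub x (List.mem_toFinset.mp hx) with h | h
    · simp [h]
    · simp [Finset.mem_insert, Finset.mem_Icc]; omega
  have hcard := Finset.card_le_card hsubset
  have : (insert s (Finset.Icc (0:Int) (pvMODC - 1))).card ≤ 16777217 := by
    calc (insert s (Finset.Icc (0:Int) (pvMODC - 1))).card
        ≤ (Finset.Icc (0:Int) (pvMODC - 1)).card + 1 := Finset.card_insert_le _ _
      _ ≤ 16777217 := by rw [Int.card_Icc]; norm_num [pvMODC]
  rw [← List.toFinset_card_of_nodup hnd]
  omega

-- invariant carried by A's loop (only so that the dict's size bounds the recursion)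
def AInv (start : Int) (d : PySem.Dict Int Int) : Prop :=
  d.keys.Nodup ∧ ∀ k ∈ d.keys, k = start ∨ (0 ≤ k ∧ k < pvMODC)

def calcLoopA (start rounds : Int) (num : Int) (lookup : PySem.Dict Int Int)
    (nums : List Int) (round : Int) (hinv : AInv start lookup) : Int :=
  let num' := find_next num
  if round = rounds then num'
  else
    match h : lookup.get? num' with
    | some cycle_sp =>
      -- cycle found: modular index into nums (always in range on reachable states)
      let cycle_len := round - cycle_sp
      let remaining_rounds := PySem.Int.mod (rounds + 1 - cycle_sp) cycle_len
      let pos_in_round := PySem.Int.mod (remaining_rounds - 1) cycle_len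
      PySem.List.pyGetD nums (cycle_sp + pos_in_round) 0
    | none =>
      calcLoopA start rounds num' (lookup.insert num' round) (nums ++ [num']) (round + 1)
        (by
          refine ⟨PySem.Dict.nodup_keys_insert _ _ _ hinv.1, ?_⟩
          intro k hk
          rcases (PySem.Dict.mem_keys_insert _ _ _ _).mp hk with hk | hk
          · exact Or.inr (hk ▸ find_next_range num)
          · exact hinv.2 k hk)
termination_by 16777218 - lookup.size
decreasing_by
  have hnc : lookup.contains (find_next num) = false := by
    rw [PySem.Dict.contains_eq_decide_mem_keys]
    simpa using (PySem.Dict.get?_eq_none_iff_not_mem_keys _ _).mp h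
  have hsz : lookup.keys.length ≤ 16777217 := pv_keys_len start _ hinv.1 hinv.2
  have hsz' : lookup.keys.length = lookup.size := by
    simp [PySem.Dict.keys, PySem.Dict.size]
  rw [PySem.Dict.size_insert]
  simp only [hnc, if_false, Bool.false_eq_true]
  omega

def calc_py (start : Int) (rounds : Int) : Int :=
  calcLoopA start rounds start (PySem.Dict.mk [(start, 0)]) [start] 1
    (by constructor
        · simp
        · intro k hk
          simp at hk
          exact Or.inl hk)
-- ===== PORT B =====
-- Proof helpers for port B's termination: find_next is injective on [0, pvMODC)
-- (proved through BitVec 24), hence the walked orbit stays duplicate-free and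
-- is bounded by pvMODC.

lemma pvBvShiftLXorInj (k : Nat) (hk : 0 < k) (a b : BitVec 24)
    (h : (a <<< k) ^^^ a = (b <<< k) ^^^ b) : a = b := by
  have key : ∀ i, i < 24 → a.getLsbD i = b.getLsbD i := by
    intro i
    induction i using Nat.strong_induction_on with
    | _ i ih =>
      intro hi
      have h' := congrArg (fun v => v.getLsbD i) h
      simp only [BitVec.getLsbD_xor, BitVec.getLsbD_shiftLeft] at h'
      by_cases hik : i < k
      · simpa [hik] using h'
      · have hbit : a.getLsbD (i - k) = b.getLsbD (i - k) := ih (i - k) (by omega) (by omega)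
        simp only [hi, hik, decide_true, decide_false, Bool.not_false, Bool.true_and, hbit] at h'
        cases hb : b.getLsbD (i - k) <;> rw [hb] at h' <;> simpa using h'
  exact BitVec.eq_of_getLsbD_eq key

lemma pvBvShiftRXorInj (k : Nat) (hk : 0 < k) (a b : BitVec 24)
    (h : (a >>> k) ^^^ a = (b >>> k) ^^^ b) : a = b := by
  have key : ∀ n i, 24 - i ≤ n → i < 24 → a.getLsbD i = b.getLsbD i := by
    intro n
    induction n with
    | zero => intro i h1 h2; omega
    | succ n ih =>
      intro i h1 hi
      have h' := congrArg (fun v => v.getLsbD i) h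
      simp only [BitVec.getLsbD_xor, BitVec.getLsbD_ushiftRight] at h'
      have hbit : a.getLsbD (k + i) = b.getLsbD (k + i) := by
        by_cases hki : k + i < 24
        · exact ih (k + i) (by omega) hki
        · rw [BitVec.getLsbD_of_ge a _ (by omega), BitVec.getLsbD_of_ge b _ (by omega)]
      rw [hbit] at h'
      cases hb : b.getLsbD (k + i) <;> rw [hb] at h' <;> simpa using h'
  exact BitVec.eq_of_getLsbD_eq (fun i hi => key 24 i (by omega) hi)

lemma pvXorMod (a b : Nat) (hb : b < 16777216) :
    (a % 16777216) ^^^ b = (a ^^^ b) % 16777216 := by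
  have h24 : (16777216 : Nat) = 2 ^ 24 := by norm_num
  rw [h24] at hb ⊢
  apply Nat.eq_of_testBit_eq
  intro i
  simp only [Nat.testBit_mod_two_pow, Nat.testBit_xor]
  by_cases hi : i < 24
  · simp [hi]
  · have hb' : b < 2 ^ i := lt_of_lt_of_le hb (Nat.pow_le_pow_right (by norm_num) (by omega))
    simp [hi, Nat.testBit_lt_two_pow hb']

-- the three rounds of find_next, at BitVec 24 level
def pvBv1 (v : BitVec 24) : BitVec 24 := (v <<< (6:Nat)) ^^^ v
def pvBv2 (v : BitVec 24) : BitVec 24 := (v >>> (5:Nat)) ^^^ v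
def pvBv3 (v : BitVec 24) : BitVec 24 := (v <<< (11:Nat)) ^^^ v

lemma pvStep1_eq (v : BitVec 24) :
    PySem.Int.mod (PySem.Int.bxor ((v.toNat : Int) <<< (6:Nat)) (v.toNat : Int)) pvMODC
      = ((pvBv1 v).toNat : Int) := by
  have hcast : ((v.toNat : Int) <<< (6:Nat)) = ((v.toNat <<< 6 : Nat) : Int) := by
    simp [Int.shiftLeft_eq, Nat.shiftLeft_eq]
  have hm : pvMODC = ((16777216 : Nat) : Int) := by norm_num [pvMODC]
  rw [hcast, PySem.Int.bxor_natCast, hm, PySem.Int.mod_natCast]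
  congr 1
  have hv : v.toNat < 16777216 := by have := v.isLt; norm_num at this ⊢; omega
  rw [pvBv1, BitVec.toNat_xor, BitVec.toNat_shiftLeft,
    show (2:Nat) ^ 24 = 16777216 by norm_num]
  exact (pvXorMod _ _ hv).symm

lemma pvStep2_eq (v : BitVec 24) :
    PySem.Int.mod (PySem.Int.bxor ((v.toNat : Int) >>> (5:Nat)) (v.toNat : Int)) pvMODC
      = ((pvBv2 v).toNat : Int) := by
  have hcast : ((v.toNat : Int) >>> (5:Nat)) = ((v.toNat >>> 5 : Nat) : Int) := by
    simp [Int.shiftRight_eq]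
  have hm : pvMODC = ((16777216 : Nat) : Int) := by norm_num [pvMODC]
  rw [hcast, PySem.Int.bxor_natCast, hm, PySem.Int.mod_natCast]
  congr 1
  rw [pvBv2, BitVec.toNat_xor, BitVec.toNat_ushiftRight]
  rw [show (16777216:Nat) = 2 ^ 24 by norm_num]
  exact Nat.mod_eq_of_lt (Nat.xor_lt_two_pow (lt_of_le_of_lt (Nat.shiftRight_le _ _) v.isLt) v.isLt)

lemma pvStep3_eq (v : BitVec 24) :
    PySem.Int.mod (PySem.Int.bxor ((v.toNat : Int) <<< (11:Nat)) (v.toNat : Int)) pvMODC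
      = ((pvBv3 v).toNat : Int) := by
  have hcast : ((v.toNat : Int) <<< (11:Nat)) = ((v.toNat <<< 11 : Nat) : Int) := by
    simp [Int.shiftLeft_eq, Nat.shiftLeft_eq]
  have hm : pvMODC = ((16777216 : Nat) : Int) := by norm_num [pvMODC]
  rw [hcast, PySem.Int.bxor_natCast, hm, PySem.Int.mod_natCast]
  congr 1
  have hv : v.toNat < 16777216 := by have := v.isLt; norm_num at this ⊢; omega
  rw [pvBv3, BitVec.toNat_xor, BitVec.toNat_shiftLeft,
    show (2:Nat) ^ 24 = 16777216 by norm_num]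
  exact (pvXorMod _ _ hv).symm

lemma find_next_bv (x : Int) (h0 : 0 ≤ x) (h1 : x < pvMODC) :
    find_next x = ((pvBv3 (pvBv2 (pvBv1 (BitVec.ofNat 24 x.toNat)))).toNat : Int) := by
  have hxN : x.toNat < 2 ^ 24 := by norm_num [pvMODC] at h1; omega
  have hx : x = ((BitVec.ofNat 24 x.toNat).toNat : Int) := by
    rw [BitVec.toNat_ofNat, Nat.mod_eq_of_lt hxN, Int.toNat_of_nonneg h0]
  show PySem.Int.mod (PySem.Int.bxor
      ((PySem.Int.mod (PySem.Int.bxor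
          ((PySem.Int.mod (PySem.Int.bxor (x <<< (6:Nat)) x) pvMODC) >>> (5:Nat))
          (PySem.Int.mod (PySem.Int.bxor (x <<< (6:Nat)) x) pvMODC)) pvMODC) <<< (11:Nat))
      (PySem.Int.mod (PySem.Int.bxor
          ((PySem.Int.mod (PySem.Int.bxor (x <<< (6:Nat)) x) pvMODC) >>> (5:Nat))
          (PySem.Int.mod (PySem.Int.bxor (x <<< (6:Nat)) x) pvMODC)) pvMODC)) pvMODC
    = ((pvBv3 (pvBv2 (pvBv1 (BitVec.ofNat 24 x.toNat)))).toNat : Int)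
  conv_lhs => rw [hx]
  rw [pvStep1_eq, pvStep2_eq, pvStep3_eq]

lemma find_next_inj (a b : Int) (ha0 : 0 ≤ a) (ha1 : a < pvMODC) (hb0 : 0 ≤ b) (hb1 : b < pvMODC)
    (h : find_next a = find_next b) : a = b := by
  rw [find_next_bv a ha0 ha1, find_next_bv b hb0 hb1] at h
  have h' := BitVec.eq_of_toNat_eq (by exact_mod_cast h)
  have h1 := pvBvShiftLXorInj 11 (by norm_num) _ _ h'
  have h2 := pvBvShiftRXorInj 5 (by norm_num) _ _ h1
  have h3 := pvBvShiftLXorInj 6 (by norm_num) _ _ h2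
  have := congrArg BitVec.toNat h3
  rw [BitVec.toNat_ofNat, BitVec.toNat_ofNat] at this
  have hma : a.toNat % 2 ^ 24 = a.toNat := Nat.mod_eq_of_lt (by norm_num [pvMODC] at ha1; omega)
  have hmb : b.toNat % 2 ^ 24 = b.toNat := Nat.mod_eq_of_lt (by norm_num [pvMODC] at hb1; omega)
  rw [hma, hmb] at this
  omega
lemma iter_range (first : Int) (h : 0 ≤ first ∧ first < pvMODC) (k : Nat) :
    0 ≤ find_next^[k] first ∧ find_next^[k] first < pvMODC := by
  induction k with
  | zero => simpa using h
  | succ k _ => rw [Function.iterate_succ_apply']; exact find_next_range _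

lemma iter_cancel (j : Nat) (x y : Int) (hx : 0 ≤ x ∧ x < pvMODC) (hy : 0 ≤ y ∧ y < pvMODC)
    (h : find_next^[j] x = find_next^[j] y) : x = y := by
  induction j with
  | zero => simpa using h
  | succ j ih =>
    rw [Function.iterate_succ_apply', Function.iterate_succ_apply'] at h
    exact ih (find_next_inj _ _ (iter_range x hx j).1 (iter_range x hx j).2
      (iter_range y hy j).1 (iter_range y hy j).2 h)

-- a new orbit element differing from the base point is not yet in the orbit
lemma orbit_fresh (first : Int) (h : 0 ≤ first ∧ first < pvMODC) (len : Nat)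
    (hnd : ((List.range len).map (fun i => find_next^[i] first)).Nodup)
    (hne : find_next^[len] first ≠ first) :
    find_next^[len] first ∉ (List.range len).map (fun i => find_next^[i] first) := by
  intro hmem
  obtain ⟨j, hj, hval⟩ := List.mem_map.mp hmem
  have hjlt : j < len := List.mem_range.mp hj
  have hper : find_next^[len - j] first = first := by
    have heq : find_next^[j] (find_next^[len - j] first) = find_next^[j] first := by
      rw [← Function.iterate_add_apply, show j + (len - j) = len by omega]
      exact hval.symm
    exact iter_cancel j _ _ (iter_range first h _) h heq
  rcases Nat.eq_zero_or_pos j with hj0 | hjpos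
  · exact hne (by subst hj0; simpa using hper)
  · have hlj : len - j < len := by omega
    have hlen0 : 0 < len := by omega
    have hidx : ((List.range len).map (fun i => find_next^[i] first))[0]'(by simpa using hlen0)
        = ((List.range len).map (fun i => find_next^[i] first))[len - j]'(by simpa using hlj) := by
      simp [hper]
    have := List.Nodup.getElem_inj_iff hnd |>.mp hidx
    omega

lemma pv_nodup_append (l : List Int) (a : Int) (h : l.Nodup) (h2 : a ∉ l) :
    (l ++ [a]).Nodup := by
  simp [List.nodup_append, h]
  exact fun x hx hax => h2 (hax ▸ hx)

lemma pv_orbit_len (l : List Int) (hnd : l.Nodup)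
    (hsub : ∀ x ∈ l, 0 ≤ x ∧ x < pvMODC) : l.length ≤ 16777216 := by
  have hsubset : l.toFinset ⊆ Finset.Icc (0:Int) (pvMODC - 1) := by
    intro x hx
    have := hsub x (List.mem_toFinset.mp hx)
    simp [Finset.mem_Icc]; omega
  have hcard := Finset.card_le_card hsubset
  rw [Int.card_Icc] at hcard
  norm_num [pvMODC] at hcard
  rw [← List.toFinset_card_of_nodup hnd]
  omega

-- invariant carried by B's loop: `orbit` is the duplicate-free list of the first
-- `orbit.length` iterates of `first`, and `num` is the next iterate
def BInv (first : Int) (orbit : List Int) (num : Int) : Prop :=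
  (0 ≤ first ∧ first < pvMODC)
    ∧ orbit = (List.range orbit.length).map (fun i => find_next^[i] first)
    ∧ num = find_next^[orbit.length] first
    ∧ orbit.Nodup

def calcLoopB (first rounds : Int) (orbit : List Int) (num : Int) (r : Int)
    (hinv : BInv first orbit num) : Int :=
  if hstop : num = first then
    PySem.List.pyGetD orbit (PySem.Int.mod (rounds - 1) (orbit.length : Int)) 0
  else if r = rounds then num
  else
    calcLoopB first rounds (orbit ++ [num]) (find_next num) (r + 1)
      (by
        obtain ⟨hf, horb, hnum, hnd⟩ := hinv
        have hfresh : num ∉ orbit := by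
          have hh := orbit_fresh first hf orbit.length (by rw [← horb]; exact hnd)
            (by rw [← hnum]; exact hstop)
          rw [← horb] at hh
          rw [hnum]
          exact hh
        refine ⟨hf, ?_, ?_, ?_⟩
        · rw [List.length_append, List.length_singleton, List.range_succ, List.map_append]
          exact congrArg₂ _ horb (by simp [hnum])
        · rw [List.length_append, List.length_singleton, hnum,
            ← Function.iterate_succ_apply' find_next]
        · exact pv_nodup_append _ _ hnd hfresh)
termination_by 16777216 - orbit.length
decreasing_by
  obtain ⟨hf, horb, hnum, hnd⟩ := hinv
  have hfresh : num ∉ orbit := by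
    have hh := orbit_fresh first hf orbit.length (by rw [← horb]; exact hnd)
      (by rw [← hnum]; exact hstop)
    rw [← horb] at hh
    rw [hnum]
    exact hh
  have hlen : (orbit ++ [num]).length ≤ 16777216 := by
    apply pv_orbit_len _ (pv_nodup_append _ _ hnd hfresh)
    intro x hx
    rcases List.mem_append.mp hx with hx | hx
    · rw [horb] at hx
      obtain ⟨j, _, rfl⟩ := List.mem_map.mp hx
      exact iter_range first hf j
    · rw [List.mem_singleton.mp hx, hnum]
      exact iter_range first hf _
  rw [List.length_append, List.length_singleton] at hlen ⊢
  omega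

def calc_py_alt (start : Int) (rounds : Int) : Int :=
  let first := find_next start
  if rounds = 1 then first
  else
    calcLoopB first rounds [first] (find_next first) 2
      (by
        refine ⟨find_next_range start, by simp, ?_, List.nodup_singleton _⟩
        simp)
set_option maxRecDepth 10000

-- ===== PRECONDITION & SPEC =====
def Spec_calc_py (start : Int) (rounds : Int) (out : Int) : Prop := out = calc_py_alt start rounds
instance (start : Int) (rounds : Int) (out : Int) : Decidable (Spec_calc_py start rounds out) := by unfold Spec_calc_py; infer_instance

-- ===== CLAIM (what is proved, stated in full; the proofs are below) =====
def Claim_equal_calc_py : Prop := ∀ (start : Int) (rounds : Int), Dom_calc_py start rounds → Spec_calc_py start rounds (calc_py start rounds)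

-- ===== LEMMAS AND PROOFS =====

-- `pvSeq start k` is the k-th Python `num` value: start, then iterates of find_next
def pvSeq (start : Int) (k : Nat) : Int := find_next^[k] start

-- existence of a period of first = find_next start
lemma pvP_exists (start : Int) :
    ∃ p : Nat, 0 < p ∧ find_next^[p] (find_next start) = find_next start := by
  have hf : 0 ≤ find_next start ∧ find_next start < pvMODC := find_next_range start
  have hmaps : ∀ i ∈ Finset.range 16777217,
      find_next^[i] (find_next start) ∈ Finset.Icc (0:Int) (pvMODC - 1) := by
    intro i _
    have := iter_range (find_next start) hf i
    simp [Finset.mem_Icc]; omega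
  have hcard : (Finset.Icc (0:Int) (pvMODC - 1)).card < (Finset.range 16777217).card := by
    rw [Int.card_Icc]; norm_num [pvMODC]
  obtain ⟨i, _, j, _, hne, heq⟩ :=
    Finset.exists_ne_map_eq_of_card_lt_of_maps_to hcard hmaps
  rcases Nat.lt_or_ge i j with hij | hij
  · refine ⟨j - i, by omega, ?_⟩
    apply iter_cancel i _ _ (iter_range _ hf _) hf
    rw [← Function.iterate_add_apply, show i + (j - i) = j by omega]
    exact heq.symm
  · have hij' : j < i := by omega
    refine ⟨i - j, by omega, ?_⟩
    apply iter_cancel j _ _ (iter_range _ hf _) hf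
    rw [← Function.iterate_add_apply, show j + (i - j) = i by omega]
    exact heq

-- the minimal period L of first
def pvL (start : Int) : Nat := Nat.find (pvP_exists start)

lemma pvL_pos (start : Int) : 0 < pvL start := (Nat.find_spec (pvP_exists start)).1

lemma pvL_iter (start : Int) :
    find_next^[pvL start] (find_next start) = find_next start :=
  (Nat.find_spec (pvP_exists start)).2

lemma pvL_min (start : Int) (p : Nat) (hp : 0 < p) (hpL : p < pvL start) :
    find_next^[p] (find_next start) ≠ find_next start := by
  exact fun hc => Nat.find_min (pvP_exists start) hpL ⟨hp, hc⟩

-- iterates of first are periodic with period L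
lemma pvIter_fix (start : Int) (q : Nat) :
    find_next^[pvL start * q] (find_next start) = find_next start := by
  induction q with
  | zero => simp
  | succ q ih => rw [Nat.mul_succ, Function.iterate_add_apply, pvL_iter, ih]

lemma pvIter_period (start : Int) (m : Nat) :
    find_next^[m] (find_next start) = find_next^[m % pvL start] (find_next start) := by
  conv_lhs => rw [show m = m % pvL start + pvL start * (m / pvL start) from by
    have := Nat.div_add_mod m (pvL start); omega]
  rw [Function.iterate_add_apply, pvIter_fix]

-- seq version: indices ≥ 1 are periodic with period L
lemma pvSeq_period (start : Int) (a : Nat) :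
    pvSeq start (a + 1) = pvSeq start (a % pvL start + 1) := by
  rw [pvSeq, pvSeq, Function.iterate_succ_apply, Function.iterate_succ_apply]
  exact pvIter_period start a

-- the closed form both loops compute
def pvTgt (start rounds : Int) : Int :=
  find_next^[((rounds - 1) % (pvL start : Int)).toNat] (find_next start)
lemma loopB_char (start rounds : Int) :
    ∀ (k len : Nat) (orbit : List Int) (num r : Int)
      (horb : orbit = (List.range len).map (fun i => find_next^[i] (find_next start)))
      (hnum : num = find_next^[len] (find_next start))
      (hr : r = (len : Int) + 1)
      (hk : pvL start - len = k)
      (h1 : 1 ≤ len) (hL : len ≤ pvL start)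
      (hearly : ∀ t : Nat, 2 ≤ t → t ≤ len → rounds ≠ (t : Int))
      (hinv : BInv (find_next start) orbit num),
      calcLoopB (find_next start) rounds orbit num r hinv = pvTgt start rounds := by
  intro k
  induction k using Nat.strong_induction_on with
  | _ k ih =>
  intro len orbit num r horb hnum hr hk h1 hL hearly hinv
  have hlen : orbit.length = len := by rw [horb]; simp
  rw [calcLoopB]
  split_ifs with hstop hret
  · -- cycle closed: len = L, modular index
    have hlenL : len = pvL start := by
      rcases Nat.lt_or_ge len (pvL start) with hlt | hge
      · exact absurd (hnum ▸ hstop) (pvL_min start len (by omega) hlt).elim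
      · omega
    have hpos : (0:Int) < (orbit.length : Int) := by rw [hlen]; exact_mod_cast h1
    have hget : ∀ (i : Nat) (hi : i < orbit.length), orbit[i] = find_next^[i] (find_next start) := by
      subst horb; intro i hi; simp
    have hmodeq : PySem.Int.mod (rounds - 1) (orbit.length : Int)
        = (rounds - 1) % ((pvL start : Nat) : Int) := by
      rw [PySem.Int.mod_eq_emod_of_pos hpos, hlen, hlenL]
    have hmodr := pv_mod_range (rounds - 1) (orbit.length : Int) hpos
    rw [PySem.List.pyGetD_eq_getElem _ _ hmodr.1 hmodr.2]
    rw [hget _ (by omega : (PySem.Int.mod (rounds - 1) (orbit.length:Int)).toNat < orbit.length)]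
    rw [pvTgt, hmodeq]
  · -- early return at round r = rounds
    have hlenL : len < pvL start := by
      rcases Nat.lt_or_ge len (pvL start) with hlt | hge
      · exact hlt
      · have heq : len = pvL start := by omega
        exact absurd (by rw [hnum, heq]; exact pvL_iter start : num = find_next start) hstop
    have hton : ((r - 1) % ((pvL start : Nat) : Int)).toNat = len := by
      rw [hr, show (len : Int) + 1 - 1 = (len : Int) by ring,
        Int.emod_eq_of_lt (by positivity) (by exact_mod_cast hlenL)]
      simp
    rw [hnum, pvTgt, ← hret, hton]
  · -- keep walking
    have hlenL : len < pvL start := by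
      rcases Nat.lt_or_ge len (pvL start) with hlt | hge
      · exact hlt
      · have heq : len = pvL start := by omega
        exact absurd (by rw [hnum, heq]; exact pvL_iter start : num = find_next start) hstop
    apply ih (k - 1) (by omega) (len + 1)
    · rw [horb, hnum, List.range_succ, List.map_append]
      simp
    · rw [hnum, ← Function.iterate_succ_apply' find_next]
    · rw [hr]; push_cast; ring
    · omega
    · omega
    · omega
    · intro t ht2 htle
      rcases Nat.lt_or_ge t (len + 1) with hlt | hge
      · exact hearly t ht2 (by omega)
      · have heq : t = len + 1 := by omega
        subst heq
        intro hcon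
        apply hret
        rw [hr, hcon]
        push_cast; ring

lemma B_char (start rounds : Int) : calc_py_alt start rounds = pvTgt start rounds := by
  by_cases h1 : rounds = 1
  · rw [h1, show calc_py_alt start 1 = find_next start from rfl, pvTgt,
      show (1:Int) - 1 = 0 by ring, Int.zero_emod]
    simp
  · rw [calc_py_alt]
    simp only [if_neg h1]
    refine loopB_char start rounds (pvL start - 1) 1 _ _ _ (by simp) (by simp) (by norm_num)
      rfl (by omega) (pvL_pos start) (fun t ht2 htle => by omega) _

-- ===== A-side characterization =====

lemma pvSeq_succ (start : Int) (k : Nat) :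
    pvSeq start (k + 1) = find_next (pvSeq start k) := Function.iterate_succ_apply' _ _ _

lemma pvSeq_succ' (start : Int) (k : Nat) :
    pvSeq start (k + 1) = find_next^[k] (find_next start) := Function.iterate_succ_apply _ _ _

-- whether start itself lies on the cycle; D = round at which A's lookup hits, j0 = stored index
def pvD (start : Int) : Nat :=
  if find_next^[pvL start] start = start then pvL start else pvL start + 1

def pvJ0 (start : Int) : Nat :=
  if find_next^[pvL start] start = start then 0 else 1

lemma pvD_le (start : Int) : pvD start ≤ pvL start + 1 := by
  rw [pvD]; split_ifs <;> omega

lemma pvD_pos (start : Int) : 0 < pvD start := by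
  have := pvL_pos start
  rw [pvD]; split_ifs <;> omega

-- if some positive iterate fixes start, start is on the cycle and L divides that iterate count
lemma pv_start_period (start : Int) (j : Nat) (hj : 0 < j) (hfix : pvSeq start j = start) :
    pvL start ≤ j := by
  have hfirst : find_next^[j] (find_next start) = find_next start := by
    have h1 : find_next^[j] (find_next start) = find_next (find_next^[j] start) := by
      rw [← Function.iterate_succ_apply find_next j start,
        Function.iterate_succ_apply' find_next j start]
    rw [h1]
    exact congrArg find_next hfix
  by_contra hlt
  exact pvL_min start j hj (by omega) hfirst

lemma pvSeq_distinct (start : Int) (i j : Nat) (hij : i < j) (hj : j < pvD start) :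
    pvSeq start i ≠ pvSeq start j := by
  intro heq
  have hD := pvD_le start
  rcases Nat.eq_zero_or_pos i with hi0 | hipos
  · -- i = 0 : start reappears at j < D, forcing SC with j = L, contradiction
    subst hi0
    have hfix : pvSeq start j = start := heq.symm
    have hL : pvL start ≤ j := pv_start_period start j hij hfix
    have hjL : j = pvL start := by
      rw [pvD] at hj
      split_ifs at hj <;> omega
    have hSC : find_next^[pvL start] start = start := by
      rw [← hjL]; exact hfix
    rw [pvD, if_pos hSC] at hj
    omega
  · -- 1 ≤ i < j : the period j - i of first is positive and < L
    obtain ⟨i', rfl⟩ : ∃ i', i = i' + 1 := ⟨i - 1, by omega⟩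
    obtain ⟨j', rfl⟩ : ∃ j', j = j' + 1 := ⟨j - 1, by omega⟩
    rw [pvSeq_succ', pvSeq_succ'] at heq
    have hper : find_next^[j' - i'] (find_next start) = find_next start := by
      apply iter_cancel i' _ _ (iter_range _ (find_next_range start) _) (find_next_range start)
      rw [← Function.iterate_add_apply, show i' + (j' - i') = j' by omega]
      exact heq.symm
    have hjle : j' + 1 ≤ pvL start := by
      rw [pvD] at hj
      split_ifs at hj <;> omega
    exact pvL_min start (j' - i') (by omega) (by omega) hper

lemma pvSeq_D (start : Int) : pvSeq start (pvD start) = pvSeq start (pvJ0 start) := by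
  rw [pvD, pvJ0]
  split_ifs with hSC
  · exact hSC
  · show pvSeq start (pvL start + 1) = pvSeq start 1
    rw [pvSeq_succ', pvL_iter]
    rfl

lemma pvSeq_nodup (start : Int) (n : Nat) (hn : n ≤ pvD start) :
    ((List.range n).map (pvSeq start)).Nodup := by
  refine List.Nodup.map_on ?_ (List.nodup_range)
  intro x hx y hy hxy
  by_contra hne
  rcases Nat.lt_or_ge x y with h | h
  · exact pvSeq_distinct start x y h (by simp at hy; omega) hxy
  · exact pvSeq_distinct start y x (by omega) (by simp at hx; omega) hxy.symm

lemma pv_emod_sub_one (a L : Int) (hL : 0 < L) : (a % L - 1) % L = (a - 1) % L := by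
  by_cases hL1 : L = 1
  · subst hL1; simp [Int.emod_one]
  · conv_rhs => rw [Int.sub_emod]
    rw [Int.emod_eq_of_lt (by omega) (by omega : (1:Int) < L)]


lemma pv_neg_one_emod (M : Int) (hM : 0 < M) : (-1 : Int) % M = M - 1 := by
  rw [show (-1:Int) = (M - 1) + M * (-1) by ring, Int.add_mul_emod_self_left,
    Int.emod_eq_of_lt (by omega) (by omega)]

lemma pvTgt_seq (start rounds : Int) :
    pvTgt start rounds = pvSeq start (((rounds - 1) % ((pvL start : Nat) : Int)).toNat + 1) := by
  rw [pvTgt, pvSeq_succ']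

-- the value A computes in its cycle-detection branch equals the closed form
lemma pvA_branch (start rounds : Int) (r : Nat) (hD : r + 1 = pvD start) :
    PySem.List.pyGetD ((List.range (r+1)).map (pvSeq start))
      (((pvJ0 start : Nat) : Int) +
        PySem.Int.mod
          (PySem.Int.mod (rounds + 1 - ((pvJ0 start : Nat) : Int))
            (((r : Int) + 1) - ((pvJ0 start : Nat) : Int)) - 1)
          (((r : Int) + 1) - ((pvJ0 start : Nat) : Int))) 0
      = pvTgt start rounds := by
  have hLpos := pvL_pos start
  have hget : ∀ (iz : Int), 0 ≤ iz → iz < ((r:Int)+1) →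
      PySem.List.pyGetD ((List.range (r+1)).map (pvSeq start)) iz 0 = pvSeq start iz.toNat := by
    intro iz hz0 hz1
    rw [PySem.List.pyGetD_eq_getElem _ _ hz0 (by simpa using hz1)]
    simp
  by_cases hSC : find_next^[pvL start] start = start
  · -- start is on the cycle: j0 = 0, D = L
    have hj00 : pvJ0 start = 0 := by rw [pvJ0, if_pos hSC]
    have hDL : pvD start = pvL start := by rw [pvD, if_pos hSC]
    have hM : ((r : Int) + 1) - ((pvJ0 start : Nat) : Int) = ((pvL start : Nat) : Int) := by
      rw [hj00]; push_cast; omega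
    have hMpos : (0:Int) < ((pvL start : Nat) : Int) := by exact_mod_cast hLpos
    rw [hM, hj00]
    set M : Int := ((pvL start : Nat) : Int) with hMdef
    rw [PySem.Int.mod_eq_emod_of_pos hMpos, PySem.Int.mod_eq_emod_of_pos hMpos]
    push_cast
    rw [show rounds + 1 - 0 = rounds + 1 by ring, pv_emod_sub_one _ _ hMpos,
      show rounds + 1 - 1 = rounds by ring]
    have hρ0 : 0 ≤ rounds % M := Int.emod_nonneg _ (by omega)
    have hρM : rounds % M < M := Int.emod_lt_of_pos _ hMpos
    rw [zero_add, hget _ hρ0 (by omega)]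
    rw [pvTgt_seq]
    have hconn : (rounds - 1) % M = (rounds % M - 1) % M := (pv_emod_sub_one rounds M hMpos).symm
    by_cases hρ : rounds % M = 0
    · rw [hconn, hρ, show (0:Int) - 1 = -1 by ring, pv_neg_one_emod _ hMpos]
      have h2 : (M - 1).toNat + 1 = pvL start := by omega
      rw [h2, show ((0:Int)).toNat = 0 from rfl]
      exact hSC.symm
    · rw [hconn, Int.emod_eq_of_lt (a := rounds % M - 1) (b := M) (by omega) (by omega)]
      have h3 : (rounds % M).toNat = (rounds % M - 1).toNat + 1 := by omega
      rw [h3]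
  · -- start is off the cycle: j0 = 1, D = L + 1
    have hj01 : pvJ0 start = 1 := by rw [pvJ0, if_neg hSC]
    have hDL : pvD start = pvL start + 1 := by rw [pvD, if_neg hSC]
    have hM : ((r : Int) + 1) - ((pvJ0 start : Nat) : Int) = ((pvL start : Nat) : Int) := by
      rw [hj01]; push_cast; omega
    have hMpos : (0:Int) < ((pvL start : Nat) : Int) := by exact_mod_cast hLpos
    rw [hM, hj01]
    set M : Int := ((pvL start : Nat) : Int) with hMdef
    rw [PySem.Int.mod_eq_emod_of_pos hMpos, PySem.Int.mod_eq_emod_of_pos hMpos]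
    push_cast
    rw [show rounds + 1 - 1 = rounds by ring, pv_emod_sub_one _ _ hMpos]
    have hρ0 : 0 ≤ (rounds - 1) % M := Int.emod_nonneg _ (by omega)
    have hρM : (rounds - 1) % M < M := Int.emod_lt_of_pos _ hMpos
    rw [hget _ (by omega) (by omega)]
    rw [pvTgt_seq]
    have h3 : ((1:Int) + (rounds - 1) % M).toNat = ((rounds - 1) % M).toNat + 1 := by omega
    rw [h3]

lemma loopA_char (start rounds : Int) :
    ∀ (k r : Nat) (num round : Int) (lookup : PySem.Dict Int Int) (nums : List Int)
      (hnum : num = pvSeq start r)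
      (hitems : lookup.items = (List.range (r+1)).map (fun i => (pvSeq start i, (i : Int))))
      (hnums : nums = (List.range (r+1)).map (pvSeq start))
      (hround : round = (r : Int) + 1)
      (hk : pvD start - (r+1) = k)
      (hrD : r + 1 ≤ pvD start)
      (hearly : ∀ t : Nat, 1 ≤ t → t ≤ r → rounds ≠ (t : Int))
      (hinv : AInv start lookup),
      calcLoopA start rounds num lookup nums round hinv = pvTgt start rounds := by
  intro k
  induction k using Nat.strong_induction_on with
  | _ k ih =>
  intro r num round lookup nums hnum hitems hnums hround hk hrD hearly hinv
  have hLpos := pvL_pos start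
  have hkeys : lookup.keys = (List.range (r+1)).map (pvSeq start) := by
    show lookup.items.map Prod.fst = _
    rw [hitems, List.map_map]
    rfl
  have hnum' : find_next num = pvSeq start (r + 1) := by
    rw [hnum]; exact (pvSeq_succ start r).symm
  rw [calcLoopA]
  split_ifs with hret
  · -- early return: rounds = round = r + 1
    rw [hnum']
    obtain ⟨rr, hrr⟩ : ∃ rr : Nat, rounds = (rr : Int) ∧ rr = r + 1 :=
      ⟨r + 1, by omega, rfl⟩
    rw [pvTgt]
    have he : ((rounds - 1) % ((pvL start : Nat) : Int)).toNat = r % pvL start := by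
      rw [hrr.1, hrr.2]
      push_cast
      rw [show ((r:Int) + 1 - 1) = (r:Int) by ring, ← Int.natCast_mod]
      omega
    rw [he, ← pvSeq_succ']
    exact pvSeq_period start r
  · -- no early return
    rcases Nat.lt_or_ge (r + 1) (pvD start) with hlt | hge
    · -- fresh value: recurse
      have hnotmem : find_next num ∉ lookup.keys := by
        rw [hkeys, hnum']
        intro hmem
        obtain ⟨i, hi, hval⟩ := List.mem_map.mp hmem
        exact pvSeq_distinct start i (r+1) (by simp at hi; omega) hlt hval
      have hnone : lookup.get? (find_next num) = none :=
        (PySem.Dict.get?_eq_none_iff_not_mem_keys _ _).mpr hnotmem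
      have hnc : lookup.contains (find_next num) = false := by
        rw [PySem.Dict.contains_eq_decide_mem_keys]
        simpa using hnotmem
      split
      case _ cs hcs => rw [hnone] at hcs; cases hcs
      case _ hcs =>
        apply ih (k - 1) (by omega) (r + 1)
        · exact hnum'
        · rw [PySem.Dict.items_insert_of_not_contains _ _ hnc, hitems, hnum', hround]
          push_cast
          simp [List.range_succ]
        · rw [hnums, hnum']
          simp [List.range_succ]
        · rw [hround]; push_cast; ring
        · omega
        · omega
        · intro t ht1 htle
          rcases Nat.lt_or_ge t (r + 1) with h | h
          · exact hearly t ht1 (by omega)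
          · have heq : t = r + 1 := by omega
            subst heq
            intro hcon
            exact hret (by rw [hround, hcon]; push_cast; ring)
    · -- r + 1 = D : the cycle is detected
      have hD : r + 1 = pvD start := by omega
      have hj0D : pvJ0 start < pvD start := by
        rw [pvD, pvJ0]
        split_ifs <;> omega
      have hmem : (find_next num, ((pvJ0 start : Nat) : Int)) ∈ lookup.items := by
        rw [hitems, hnum', hD, pvSeq_D]
        exact List.mem_map.mpr ⟨pvJ0 start, by simp; omega, rfl⟩
      have hnodup : lookup.keys.Nodup := by
        rw [hkeys]
        exact pvSeq_nodup start (r+1) (by omega)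
      have hsome : lookup.get? (find_next num) = some ((pvJ0 start : Nat) : Int) :=
        PySem.Dict.get?_of_mem_items _ hmem hnodup
      split
      case _ cs hcs =>
        rw [hsome] at hcs
        injection hcs with hcs'
        subst hcs'
        subst hnums
        subst hround
        exact pvA_branch start rounds r hD
      case _ hcs => rw [hsome] at hcs; cases hcs
lemma A_char (start rounds : Int) : calc_py start rounds = pvTgt start rounds := by
  rw [calc_py]
  exact loopA_char start rounds (pvD start - 1) 0 start 1 _ [start] rfl
    (by simp [pvSeq]) (by simp [pvSeq]) (by norm_num) rfl (pvD_pos start)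
    (fun t ht1 htle => by omega) _

-- ===== VERDICT (by name: the statement is the Claim_ definition above) =====
theorem calc_py_spec : Claim_equal_calc_py := by
  intro start rounds _
  show calc_py start rounds = calc_py_alt start rounds
  rw [A_char, B_char]
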